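-- pv_equiv track=rewrite | github.com/pypi-data/pypi-mirror-352 | packages/grins/grins-0.1.2.tar.gz/grins-0.1.2/grins/logical_bool.py | find_state_variables
-- ===== SOURCE A (Python) =====
-- from itertools import chain, cycle
--
-- def find_state_variables(bool_lines, bool_logic_ops):
--     """
--     Processes a list of boolean logic expressions to identify state variables and their indices.
--
--     Args:
--         bool_lines (list of str): List of boolean logic expressions as strings.
--         bool_logic_ops (dict): Dictionary of boolean logic operations.
--
--     Returns:
--         tuple: A tuple containing:
--             - dict: A dictionary mapping each unique state variable to its index.
--             - list: A list of state variable nodes (left-hand side of the expressions).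
--
--     Raises:
--         ValueError: If a line does not have '=' as the second element.
--     """
--     # Replace all the parentheses with white spaces
--     bool_lines = [line.replace("(", " ").replace(")", " ") for line in bool_lines]
--     # Split the lines at white spaces
--     bool_lines = [line.split() for line in bool_lines]
--     # Make a placeholder list of the nodes for which logical expressions are defined (LHS of the expression)
--     statevar_nodes = []
--     # Loop through all the lines
--     for line in bool_lines:
--         # Checking if = is the second element in the line
--         if "=" in line[1]:
--             # Append the first element of the line to the logicexpr_nodes list
--             statevar_nodes.append(line[0])
--         else:
--             # Raise an error if the line does not have = as the second element
--             # Print the index of the line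
--             raise ValueError(
--                 f"Logical expression not defined properly ({bool_lines.index(line)})"
--             )
--     # Get the unique state variables
--     all_boolnodes = set(list(chain(*bool_lines)))
--     # Remove all boolean operations and "=" from the state variables
--     all_boolnodes = all_boolnodes - set(bool_logic_ops.values()) - set("=")
--     # Sort the state variables - ensures the order of the state variables is consistent across all runs
--     all_boolnodes = sorted(list(all_boolnodes))
--     # Make a map of the bool nodes and thier index in the list
--     all_boolnodes = {node: i for i, node in enumerate(all_boolnodes)}
--     # Return all the state variables and all boolean nodes
--     return all_boolnodes, statevar_nodes
-- ===== SOURCE B (Python) =====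
-- def find_state_variables(bool_lines, bool_logic_ops):
--     # One streaming pass: validate each line, collect its LHS, and maintain a
--     # sorted duplicate-free key list by positional insertion (no sorted(), no
--     # token set, no set differences).  The index dict is read off at the end.
--     excluded = set(bool_logic_ops.values())
--     excluded.add("=")
--     keys = []
--     statevar_nodes = []
--     for i, raw in enumerate(bool_lines):
--         line = raw.replace("(", " ").replace(")", " ").split()
--         if "=" not in line[1]:
--             raise ValueError(f"Logical expression not defined properly ({i})")
--         statevar_nodes.append(line[0])
--         for t in line:
--             if t in excluded:
--                 continue
--             pos = 0
--             while pos < len(keys) and keys[pos] < t: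
--                 pos += 1
--             if pos == len(keys) or keys[pos] != t:
--                 keys.insert(pos, t)
--     return {k: i for i, k in enumerate(keys)}, statevar_nodes
-- ===== Notes on version B (the rewrite author's own statement) =====
-- stated objective: alternative
-- what changed: B replaces A's staged pipeline (validation loop, chain-of-all-tokens into a set, two set differences, sorted(), enumerate comprehension) by a single streaming pass that validates each line while maintaining a sorted duplicate-free key list through positional insertion, skipping operator/'=' tokens as they arrive; the index dict is read off that list at the end.
import Mathlib
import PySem

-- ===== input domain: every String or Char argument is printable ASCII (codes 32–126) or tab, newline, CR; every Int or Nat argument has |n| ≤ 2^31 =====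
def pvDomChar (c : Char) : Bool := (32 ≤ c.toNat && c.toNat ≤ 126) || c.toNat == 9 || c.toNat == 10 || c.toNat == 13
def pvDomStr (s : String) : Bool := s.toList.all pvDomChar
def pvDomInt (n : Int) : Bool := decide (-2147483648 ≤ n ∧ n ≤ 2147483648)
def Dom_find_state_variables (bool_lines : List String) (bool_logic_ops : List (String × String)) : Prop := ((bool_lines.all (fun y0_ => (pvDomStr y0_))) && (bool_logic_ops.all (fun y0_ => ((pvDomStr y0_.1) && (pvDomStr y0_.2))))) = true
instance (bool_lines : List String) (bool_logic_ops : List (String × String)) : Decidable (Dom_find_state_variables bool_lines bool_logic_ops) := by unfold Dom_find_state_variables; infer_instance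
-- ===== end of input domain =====

-- B replaces A's staged pipeline (validation loop, set of all chained tokens, two set
-- differences, sorted()) by one streaming pass keeping a sorted duplicate-free key list
-- via positional insertion; alternative algorithm, same results.

-- Shared by both ports (both Pythons compute exactly this): replace parens by spaces, split at whitespace.
def pvSplitLine (s : String) : List String :=
  PySem.Str.split₀ (PySem.Str.replace (PySem.Str.replace s "(" " ") ")" " ")

-- ===== PORT A =====
-- A's validation loop: appends line[0] while "=" ∈ line[1]; none = the ValueError / IndexError path.
def pvLoopA : List (List String) → List String → Option (List String)
  | [], acc => some acc
  | l :: rest, acc =>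
    match l with
    | a :: b :: _ => if PySem.Str.isIn "=" b then pvLoopA rest (acc ++ [a]) else none
    | _ => none

def find_state_variables (bool_lines : List String) (bool_logic_ops : List (String × String)) : (List (String × Int)) × List String :=
  match pvLoopA (bool_lines.map pvSplitLine) [] with
  | none => ([], [])  -- unreachable under Pre_: the Python raises here
  | some statevar_nodes =>
    (((PySem.List.enumerate (PySem.List.sorted
        (PySem.Set.diff (PySem.Set.diff (PySem.Set.ofList (bool_lines.map pvSplitLine).flatten)
          (PySem.Set.ofList (PySem.Dict.ofList bool_logic_ops).values)) (PySem.Set.ofList ["="]))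
        (fun x => x))).foldl (fun d p => d.insert p.2 p.1)
        (PySem.Dict.empty : PySem.Dict String Int)).items,
     statevar_nodes)

-- ===== PORT B =====
-- B's inner while loop: pos advances while keys[pos] < t.
def pvFindPos : List String → String → Nat
  | [], _ => 0
  | x :: xs, t => if x < t then pvFindPos xs t + 1 else 0

-- B's positional insert: 'if pos == len(keys) or keys[pos] != t: keys.insert(pos, t)';
-- keys[pos]? ≠ some t is exactly that disjunction, and take/drop is keys.insert(pos, t) for pos ≤ len.
def pvInsertKey (keys : List String) (t : String) : List String :=
  let pos := pvFindPos keys t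
  if keys[pos]? = some t then keys else keys.take pos ++ t :: keys.drop pos

-- B's single pass: validate, collect the LHS, feed each non-excluded token to pvInsertKey.
def pvLoopB (excl : PySem.Set String) : List String → List String → List String → Option (List String × List String)
  | [], sv, keys => some (sv, keys)
  | raw :: rest, sv, keys =>
    match pvSplitLine raw with
    | a :: b :: tl =>
      if PySem.Str.isIn "=" b then
        pvLoopB excl rest (sv ++ [a])
          ((a :: b :: tl).foldl (fun ks t => if PySem.Set.contains excl t then ks else pvInsertKey ks t) keys)
      else none
    | _ => none

def find_state_variables_alt (bool_lines : List String) (bool_logic_ops : List (String × String)) : (List (String × Int)) × List String :=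
  let excl := PySem.Set.add (PySem.Set.ofList (PySem.Dict.ofList bool_logic_ops).values) "="
  match pvLoopB excl bool_lines [] [] with
  | none => ([], [])  -- unreachable under Pre_: the Python raises here
  | some (statevar_nodes, keys) =>
    (((PySem.List.enumerate keys).foldl (fun d p => d.insert p.2 p.1)
        (PySem.Dict.empty : PySem.Dict String Int)).items,
     statevar_nodes)

-- ===== PRECONDITION & SPEC =====
-- Pre_ excludes exactly the inputs on which A raises: a line whose whitespace-split (after
-- paren removal) has fewer than two tokens (IndexError) or whose second token lacks "=" (ValueError).
def pvGood (l : List String) : Bool :=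
  match l with
  | _ :: b :: _ => PySem.Str.isIn "=" b
  | _ => false

def Pre_find_state_variables (bool_lines : List String) (bool_logic_ops : List (String × String)) : Prop :=
  (bool_lines.all (fun s => pvGood (pvSplitLine s))) = true

instance (bool_lines : List String) (bool_logic_ops : List (String × String)) : Decidable (Pre_find_state_variables bool_lines bool_logic_ops) := by unfold Pre_find_state_variables; infer_instance

def pvWitness_find_state_variables : List String × (List (String × String)) :=
  (["A = B and C", "B = not A"], [("and", "and"), ("or", "or"), ("not", "not")])

def Spec_find_state_variables (bool_lines : List String) (bool_logic_ops : List (String × String)) (out : (List (String × Int)) × List String) : Prop := out = find_state_variables_alt bool_lines bool_logic_ops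
instance (bool_lines : List String) (bool_logic_ops : List (String × String)) (out : (List (String × Int)) × List String) : Decidable (Spec_find_state_variables bool_lines bool_logic_ops out) := by unfold Spec_find_state_variables; infer_instance

-- ===== CLAIM (what is proved, stated in full; the proofs are below) =====
def Claim_equal_find_state_variables : Prop := ∀ (bool_lines : List String) (bool_logic_ops : List (String × String)), Dom_find_state_variables bool_lines bool_logic_ops → Pre_find_state_variables bool_lines bool_logic_ops → Spec_find_state_variables bool_lines bool_logic_ops (find_state_variables bool_lines bool_logic_ops)

-- ===== LEMMAS AND PROOFS =====

-- head of a good line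
def pvHd (l : List String) : String := l.headD ""

theorem pvLoopA_eq (ls : List (List String)) (acc : List String)
    (h : ls.all pvGood = true) : pvLoopA ls acc = some (acc ++ ls.map pvHd) := by
  induction ls generalizing acc with
  | nil => simp [pvLoopA]
  | cons l rest ih =>
    simp only [List.all_cons, Bool.and_eq_true] at h
    match l, h.1 with
    | a :: b :: t, hg =>
      simp only [pvGood] at hg
      simp only [pvLoopA, hg, if_true, ih _ h.2]
      simp [pvHd]

-- pvInsertKey structural reductions
theorem pvInsertKey_nil (t : String) : pvInsertKey [] t = [t] := rfl

theorem pvInsertKey_cons_lt (x t : String) (xs : List String) (h : x < t) :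
    pvInsertKey (x :: xs) t = x :: pvInsertKey xs t := by
  simp only [pvInsertKey, pvFindPos, if_pos h, List.getElem?_cons_succ,
    List.take_succ_cons, List.drop_succ_cons]
  split <;> rfl

theorem pvInsertKey_cons_not_lt (x t : String) (xs : List String) (h : ¬ x < t) :
    pvInsertKey (x :: xs) t = if x = t then x :: xs else t :: x :: xs := by
  simp only [pvInsertKey, pvFindPos, if_neg h, List.getElem?_cons_zero, List.take_zero,
    List.drop_zero, List.nil_append, Option.some.injEq]

-- invariant of B's insertion: sortedness is kept and exactly t is added
theorem pvInsertKey_spec (t : String) : ∀ (K : List String), K.Pairwise (· < ·) →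
    (pvInsertKey K t).Pairwise (· < ·) ∧ ∀ y, (y ∈ pvInsertKey K t ↔ y ∈ K ∨ y = t) := by
  intro K
  induction K with
  | nil => intro _; simp [pvInsertKey_nil]
  | cons x xs ih =>
    intro hp
    rw [List.pairwise_cons] at hp
    by_cases hlt : x < t
    · obtain ⟨ihp, ihm⟩ := ih hp.2
      rw [pvInsertKey_cons_lt x t xs hlt]
      refine ⟨List.pairwise_cons.mpr ⟨?_, ihp⟩, ?_⟩
      · intro y hy
        rcases (ihm y).mp hy with h | h
        · exact hp.1 y h
        · exact h ▸ hlt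
      · intro y; simp only [List.mem_cons, ihm y, List.mem_cons]; tauto
    · rw [pvInsertKey_cons_not_lt x t xs hlt]
      by_cases hxe : x = t
      · rw [if_pos hxe]
        refine ⟨List.pairwise_cons.mpr hp, ?_⟩
        intro y; subst hxe; simp; tauto
      · rw [if_neg hxe]
        have htx : t < x := lt_of_le_of_ne (not_lt.mp hlt) (fun he => hxe he.symm)
        refine ⟨List.pairwise_cons.mpr ⟨?_, List.pairwise_cons.mpr hp⟩, ?_⟩
        · intro y hy
          rcases List.mem_cons.mp hy with rfl | hy
          · exact htx
          · exact lt_trans htx (hp.1 y hy)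
        · intro y; simp; tauto
    
theorem pvFoldIns (l : List String) : ∀ (K : List String), K.Pairwise (· < ·) →
    (l.foldl pvInsertKey K).Pairwise (· < ·) ∧ ∀ y, (y ∈ l.foldl pvInsertKey K ↔ y ∈ K ∨ y ∈ l) := by
  induction l with
  | nil => intro K hp; simpa using hp
  | cons t l ih =>
    intro K hp
    obtain ⟨hp', hm'⟩ := pvInsertKey_spec t K hp
    obtain ⟨ihp, ihm⟩ := ih _ hp'
    refine ⟨ihp, ?_⟩
    intro y
    rw [List.foldl_cons, ihm y, hm' y]
    simp; tauto

-- the skip-if-excluded fold is the fold over the filtered tokens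
theorem pvFoldIf (excl : PySem.Set String) (l : List String) : ∀ (K : List String),
    l.foldl (fun ks t => if PySem.Set.contains excl t then ks else pvInsertKey ks t) K
      = (l.filter (fun t => !PySem.Set.contains excl t)).foldl pvInsertKey K := by
  induction l with
  | nil => intro K; rfl
  | cons t l ih =>
    intro K
    simp only [List.foldl_cons]
    by_cases hm : t ∈ excl
    · have hc : PySem.Set.contains excl t = true := (PySem.Set.contains_iff _ _).mpr hm
      rw [if_pos hc, List.filter_cons_of_neg (by simp [hm]), ih]
    · have hc : ¬ PySem.Set.contains excl t = true := fun hx => hm ((PySem.Set.contains_iff _ _).mp hx)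
      rw [if_neg hc, List.filter_cons_of_pos (by simp [hm]), List.foldl_cons, ih]

theorem pvLoopB_eq (excl : PySem.Set String) (ls : List String) (sv keys : List String)
    (h : (ls.map pvSplitLine).all pvGood = true) :
    pvLoopB excl ls sv keys = some (sv ++ (ls.map pvSplitLine).map pvHd,
      ((ls.map pvSplitLine).flatten.filter (fun t => !PySem.Set.contains excl t)).foldl pvInsertKey keys) := by
  induction ls generalizing sv keys with
  | nil => simp [pvLoopB]
  | cons raw rest ih =>
    simp only [List.map_cons, List.all_cons, Bool.and_eq_true] at h
    have h1 := h.1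
    match hsp : pvSplitLine raw, h1 with
    | a :: b :: t, hg =>
      simp only [pvGood] at hg
      simp only [pvLoopB, hsp, hg, if_true]
      rw [ih _ _ (by simpa using h.2), pvFoldIf]
      simp only [List.map_cons, hsp, List.flatten_cons, List.filter_append, List.foldl_append]
      simp [pvHd, List.append_assoc]

-- Pre_ in terms of the split lines
theorem pvPre_all (bool_lines : List String) (bool_logic_ops : List (String × String))
    (h : Pre_find_state_variables bool_lines bool_logic_ops) :
    (bool_lines.map pvSplitLine).all pvGood = true := by
  unfold Pre_find_state_variables at h
  rw [List.all_map]
  simpa [Function.comp] using h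

-- B's final key list is exactly A's sorted set-difference list
theorem pvKeys_eq (toks V : List String) :
    PySem.List.sorted (PySem.Set.diff (PySem.Set.diff (PySem.Set.ofList toks)
        (PySem.Set.ofList V)) (PySem.Set.ofList ["="])) (fun x => x) false
      = (toks.filter (fun t => !PySem.Set.contains (PySem.Set.add (PySem.Set.ofList V) "=") t)).foldl
          pvInsertKey [] := by
  obtain ⟨hpair, hmem⟩ := pvFoldIns (toks.filter (fun t => !PySem.Set.contains (PySem.Set.add (PySem.Set.ofList V) "=") t)) [] (by simp)
  apply PySem.List.sorted_eq_of_perm_of_pairwise_lt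
  · -- permutation: same membership, both nodup
    have hndB : ((toks.filter (fun t => !PySem.Set.contains (PySem.Set.add (PySem.Set.ofList V) "=") t)).foldl pvInsertKey []).Nodup :=
      hpair.imp ne_of_lt
    have hndS : (PySem.Set.diff (PySem.Set.diff (PySem.Set.ofList toks)
        (PySem.Set.ofList V)) (PySem.Set.ofList ["="])).Nodup :=
      PySem.Set.nodup_diff _ _ (PySem.Set.nodup_diff _ _ (PySem.Set.nodup_ofList toks))
    apply (List.perm_ext_iff_of_nodup hndB hndS).mpr
    intro y
    rw [hmem y, PySem.Set.mem_diff, PySem.Set.mem_diff, PySem.Set.mem_ofList,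
      PySem.Set.mem_ofList, PySem.Set.mem_ofList, List.mem_filter]
    have hc : (PySem.Set.contains (PySem.Set.add (PySem.Set.ofList V) "=") y = true) ↔ (y ∈ V ∨ y = "=") := by
      rw [PySem.Set.contains_iff, PySem.Set.mem_add, PySem.Set.mem_ofList]
    simp only [List.mem_singleton, Bool.not_eq_true', ← Bool.not_eq_true, hc]
    tauto
  · exact hpair

-- ===== VERDICT (by name: the statement is the Claim_ definition above) =====
theorem find_state_variables_spec : Claim_equal_find_state_variables := by
  intro bool_lines bool_logic_ops _ hpre
  have hall := pvPre_all bool_lines bool_logic_ops hpre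
  unfold Spec_find_state_variables find_state_variables find_state_variables_alt
  rw [pvLoopA_eq _ _ hall]
  simp only [pvLoopB_eq _ _ _ _ hall, List.nil_append]
  rw [pvKeys_eq ((bool_lines.map pvSplitLine).flatten) ((PySem.Dict.ofList bool_logic_ops).values)]
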